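-- pv_equiv track=rewrite | github.com/okaykoa/adventofcode2025 | 3.py | find_next_number
-- ===== SOURCE A (Python) =====
-- def find_next_number(id, remaining_digits, last_index):
--     digit = "a"
--     index = -1
--
--     finished = False
--     search_term = 10
--     while finished == False:
--
--         if search_term <= 0:
--             break
--
--         search_term -= 1
--
--         try:
--             search_index = id.index(str(search_term), last_index + 1)
--         except ValueError:
--             continue
--
--         if search_index >= len(id) - remaining_digits:
--             continue
--
--         else:
--             digit = id[search_index]
--             index = search_index
--             finished = True
--             break
--
--     return digit, index
-- ===== SOURCE B (Python) =====
-- def find_next_number(id, remaining_digits, last_index):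
--     # Single left-to-right scan of the window keeping the best (highest) digit
--     # seen so far and its first index.
--     n = len(id)
--     start = last_index + 1
--     if start < 0:
--         start = max(0, n + start)  # a negative start counts from the end, as str.index does
--     end = min(n, n - remaining_digits)
--     best = None
--     for i in range(start, end):
--         c = id[i]
--         if "0" <= c <= "9" and (best is None or c > best[0]):
--             best = (c, i)
--     return best if best is not None else ("a", -1)
-- ===== Notes on version B (the rewrite author's own statement) =====
-- stated objective: alternative
-- what changed: Replaces ten separate str.index scans (one per digit 9..0, each over the tail of the string) by a single left-to-right pass over the window that keeps the highest digit seen so far and its first index.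
import Mathlib
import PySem

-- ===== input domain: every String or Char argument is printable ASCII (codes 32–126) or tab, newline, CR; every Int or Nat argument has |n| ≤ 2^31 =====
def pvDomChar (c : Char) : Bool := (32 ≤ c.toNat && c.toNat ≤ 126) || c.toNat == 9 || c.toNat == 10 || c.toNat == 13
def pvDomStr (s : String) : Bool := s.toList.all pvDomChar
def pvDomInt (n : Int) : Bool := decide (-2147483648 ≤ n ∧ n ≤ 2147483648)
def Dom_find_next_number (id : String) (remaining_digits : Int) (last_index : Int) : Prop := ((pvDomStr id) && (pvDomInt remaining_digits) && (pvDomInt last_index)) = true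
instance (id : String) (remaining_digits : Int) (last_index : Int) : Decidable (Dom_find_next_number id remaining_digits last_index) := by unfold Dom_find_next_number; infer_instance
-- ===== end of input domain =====

-- B replaces A's ten str.index scans (one per digit 9..0) by one left-to-right pass
-- over the window keeping the highest digit seen so far and its first index (objective: alternative).

-- ===== PORT A =====
-- A's while loop: search_term counts down from 10; each iteration decrements it and tries
-- id.index(str(search_term), last_index + 1) (ValueError = findFrom -1 ⇒ continue),
-- checks the window bound, else returns (id[search_index], search_index).
def find_next_number_loop (id : String) (remaining_digits : Int) (last_index : Int) : Nat → String × Int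
  | 0 => ("a", -1)                      -- search_term <= 0: break with digit = "a", index = -1
  | st + 1 =>
    let search_index := PySem.Str.findFrom id (PySem.Int.toStr (st : Int)) (last_index + 1)
    if search_index = -1 then           -- except ValueError: continue
      find_next_number_loop id remaining_digits last_index st
    else if PySem.Str.len id - remaining_digits ≤ search_index then   -- search_index >= len(id) - remaining_digits: continue
      find_next_number_loop id remaining_digits last_index st
    else
      match PySem.Str.pyGet? id search_index with                     -- digit = id[search_index] (always in range here)
      | some c => (String.singleton c, search_index)
      | none => ("a", search_index)

def find_next_number (id : String) (remaining_digits : Int) (last_index : Int) : String × Int :=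
  find_next_number_loop id remaining_digits last_index 10

-- ===== PORT B =====
def find_next_number_alt (id : String) (remaining_digits : Int) (last_index : Int) : String × Int :=
  let n : Int := PySem.Str.len id
  let start0 : Int := last_index + 1
  let start : Int := if start0 < 0 then max 0 (n + start0) else start0
  let stop : Int := min n (n - remaining_digits)
  let best : Option (Char × Int) :=
    (PySem.List.pyRange start stop 1).foldl (fun best i =>
      match PySem.Str.pyGet? id i with
      | some c =>
        if ('0' ≤ c && c ≤ '9') && (match best with | none => true | some bd => decide (bd.1 < c)) then
          some (c, i)
        else best
      | none => best) none
  match best with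
  | some (c, i) => (String.singleton c, i)
  | none => ("a", -1)

-- ===== PRECONDITION & SPEC =====
def Spec_find_next_number (id : String) (remaining_digits : Int) (last_index : Int) (out : String × Int) : Prop := out = find_next_number_alt id remaining_digits last_index
instance (id : String) (remaining_digits : Int) (last_index : Int) (out : String × Int) : Decidable (Spec_find_next_number id remaining_digits last_index out) := by unfold Spec_find_next_number; infer_instance

-- ===== CLAIM (what is proved, stated in full; the proofs are below) =====
def Claim_equal_find_next_number : Prop := ∀ (id : String) (remaining_digits : Int) (last_index : Int), Dom_find_next_number id remaining_digits last_index → Spec_find_next_number id remaining_digits last_index (find_next_number id remaining_digits last_index)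

-- ===== LEMMAS AND PROOFS =====

-- the normalised start position both programs effectively scan from
def pvStart (id : String) (last_index : Int) : Int :=
  if last_index + 1 < 0 then max 0 ((id.toList.length : Int) + (last_index + 1)) else last_index + 1

-- window membership for a character position
def InWin (id : String) (rd li : Int) (i : Nat) : Prop :=
  pvStart id li ≤ (i : Int) ∧ (i : Int) < (id.toList.length : Int) - rd ∧ i < id.toList.length

-- the common characterisation of the result: either no digit char in the window, or
-- the greatest digit char of the window together with its first window index
def Q (id : String) (rd li : Int) (out : String × Int) : Prop :=
  (out = ("a", -1) ∧ ∀ i c, InWin id rd li i → id.toList[i]? = some c → ¬ ('0' ≤ c ∧ c ≤ '9'))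
  ∨ (∃ (c : Char) (i : Nat), out = (String.singleton c, (i : Int)) ∧ InWin id rd li i ∧
      id.toList[i]? = some c ∧ ('0' ≤ c ∧ c ≤ '9') ∧
      (∀ j c', InWin id rd li j → id.toList[j]? = some c' → ('0' ≤ c' ∧ c' ≤ '9') → c' ≤ c) ∧
      (∀ j, InWin id rd li j → j < i → id.toList[j]? ≠ some c))

lemma char_le_iff (a b : Char) : (a ≤ b) ↔ a.toNat ≤ b.toNat := Iff.rfl

lemma digChar_toNat (d : Nat) (h : d < 10) : (Char.ofNat (48 + d)).toNat = 48 + d := by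
  interval_cases d <;> decide

lemma dig_digChar (d : Nat) (h : d < 10) :
    '0' ≤ Char.ofNat (48 + d) ∧ Char.ofNat (48 + d) ≤ '9' := by
  interval_cases d <;> decide

lemma eq_digChar_of_toNat (c : Char) (d : Nat) (hd : d < 10) (h : c.toNat = 48 + d) :
    c = Char.ofNat (48 + d) := by
  apply Char.ext
  exact UInt32.toNat_inj.mp (by rw [show (Char.ofNat (48+d)).val.toNat = (Char.ofNat (48+d)).toNat from rfl, digChar_toNat d hd]; exact h)

lemma Q_unique (id : String) (rd li : Int) (o1 o2 : String × Int)
    (h1 : Q id rd li o1) (h2 : Q id rd li o2) : o1 = o2 := by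
  rcases h1 with ⟨e1, n1⟩ | ⟨c1, i1, e1, w1, g1, d1, m1, f1⟩
  · rcases h2 with ⟨e2, _⟩ | ⟨c2, i2, e2, w2, g2, d2, m2, f2⟩
    · rw [e1, e2]
    · exact absurd d2 (n1 i2 c2 w2 g2)
  · rcases h2 with ⟨e2, n2⟩ | ⟨c2, i2, e2, w2, g2, d2, m2, f2⟩
    · exact absurd d1 (n2 i1 c1 w1 g1)
    · have hc : c1 = c2 := le_antisymm (m2 i1 c1 w1 g1 d1) (m1 i2 c2 w2 g2 d2)
      subst hc
      have hi : i1 = i2 := by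
        rcases Nat.lt_trichotomy i1 i2 with h | h | h
        · exact absurd g1 (f2 i1 w1 h)
        · exact h
        · exact absurd g2 (f1 i2 w2 h)
      rw [e1, e2, hi]

lemma single_prefix_drop (l : List Char) (c : Char) (i : Nat) :
    [c] <+: l.drop i ↔ l[i]? = some c := by
  rw [← List.head?_drop]
  cases h : (l.drop i) with
  | nil => simp
  | cons x xs => simp [List.cons_prefix_cons]; exact comm

lemma toStr_digit (d : Nat) (h : d < 10) :
    (PySem.Int.toStr (d : Int)).toList = [Char.ofNat (48 + d)] := by
  interval_cases d <;> decide

lemma findFrom_clamp (s sub : List Char) (hsub : sub ≠ []) (start : Int) :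
    PySem.Chars.findFrom s sub start none =
      PySem.Chars.findFrom s sub (PySem.List.clampIdx s.length start) none := by
  have hsub' : ¬ sub <:+: ([] : List Char) := by simpa using hsub
  by_cases h1 : start < 0
  · have hc : ((PySem.List.clampIdx s.length start : Nat) : Int) = if start + (s.length : Int) < 0 then 0 else start + (s.length : Int) := by
      simp only [PySem.List.clampIdx]; split_ifs <;> push_cast <;> omega
    simp only [PySem.Chars.findFrom, hc]
    split_ifs <;> first | rfl | omega
  · by_cases h2 : start ≤ (s.length : Int)
    · have hc : ((PySem.List.clampIdx s.length start : Nat) : Int) = start := by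
        simp only [PySem.List.clampIdx]; split_ifs <;> push_cast <;> omega
      simp only [PySem.Chars.findFrom, hc]
    · have hc : (PySem.List.clampIdx s.length start : Nat) = s.length := by
        simp only [PySem.List.clampIdx]; split_ifs <;> push_cast <;> omega
      have hfind : PySem.Chars.find (List.drop ((s.length : Int)).toNat (List.take ((s.length : Int)).toNat s)) sub = -1 := by
        rw [Int.toNat_natCast, List.take_length, List.drop_length]
        exact (PySem.Chars.find_eq_neg_one_iff _ _).mpr hsub'
      simp only [PySem.Chars.findFrom, hc]
      split_ifs <;> first | rfl | omega

lemma clamp_le_iff (id : String) (li : Int) (i : Nat) (hi : i < id.toList.length) :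
    ((PySem.List.clampIdx id.toList.length (li + 1) : Nat) : Int) ≤ (i : Int) ↔
      pvStart id li ≤ (i : Int) := by
  simp only [PySem.List.clampIdx, pvStart]
  split_ifs <;> push_cast <;> omega

-- A's loop with fuel k considers exactly the digit characters of value below k
def QA (id : String) (rd li : Int) (k : Nat) (out : String × Int) : Prop :=
  (out = ("a", -1) ∧ ∀ i c, InWin id rd li i → id.toList[i]? = some c → ('0' ≤ c ∧ c ≤ '9') → ¬ (c.toNat < 48 + k))
  ∨ (∃ (c : Char) (i : Nat), out = (String.singleton c, (i : Int)) ∧ InWin id rd li i ∧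
      id.toList[i]? = some c ∧ ('0' ≤ c ∧ c ≤ '9') ∧ c.toNat < 48 + k ∧
      (∀ j c', InWin id rd li j → id.toList[j]? = some c' → ('0' ≤ c' ∧ c' ≤ '9') → c'.toNat < 48 + k → c' ≤ c) ∧
      (∀ j, InWin id rd li j → j < i → id.toList[j]? ≠ some c))

lemma QA_succ_no (id : String) (rd li : Int) (k : Nat) (hk : k < 10) (out : String × Int)
    (h : QA id rd li k out)
    (hno : ∀ i, InWin id rd li i → id.toList[i]? ≠ some (Char.ofNat (48 + k))) :
    QA id rd li (k + 1) out := by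
  rcases h with ⟨e, hn⟩ | ⟨c, i, e, hw, hg, hd, hlt, hm, hf⟩
  · left
    refine ⟨e, ?_⟩
    intro i c hwin hget hdig hlt
    by_cases hc : c.toNat < 48 + k
    · exact hn i c hwin hget hdig hc
    · have hceq : c = Char.ofNat (48 + k) := eq_digChar_of_toNat c k hk (by omega)
      exact hno i hwin (hceq ▸ hget)
  · right
    refine ⟨c, i, e, hw, hg, hd, by omega, ?_, hf⟩
    intro j c' hwj hgj hdj hltj
    by_cases hc : c'.toNat < 48 + k
    · exact hm j c' hwj hgj hdj hc
    · have hceq : c' = Char.ofNat (48 + k) := eq_digChar_of_toNat c' k hk (by omega)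
      exact absurd (hceq ▸ hgj) (hno j hwj)

lemma A_loop_QA (id : String) (rd li : Int) (k : Nat) (hk : k ≤ 10) :
    QA id rd li k (find_next_number_loop id rd li k) := by
  induction k with
  | zero =>
    left
    refine ⟨rfl, ?_⟩
    intro i c _ _ hd
    have h48 : 48 ≤ c.toNat := (char_le_iff '0' c).mp hd.1
    omega
  | succ k ih =>
    have hk10 : k < 10 := by omega
    have ihk := ih (by omega)
    simp only [find_next_number_loop]
    rw [show PySem.Str.findFrom id (PySem.Int.toStr (k : Int)) (li + 1) =
          PySem.Chars.findFrom id.toList [Char.ofNat (48 + k)] ((PySem.List.clampIdx id.toList.length (li + 1) : Nat) : Int) none by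
        rw [PySem.Str.findFrom_eq, toStr_digit k hk10, findFrom_clamp _ _ (by simp) (li + 1)]]
    set c0 := Char.ofNat (48 + k) with hc0
    set S := PySem.List.clampIdx id.toList.length (li + 1) with hS
    have hSn : S ≤ id.toList.length := by rw [hS]; simp only [PySem.List.clampIdx]; split_ifs <;> omega
    by_cases hf : PySem.Chars.findFrom id.toList [c0] (S : Int) none = -1
    · rw [if_pos hf]
      apply QA_succ_no id rd li k hk10 _ ihk
      intro i hwin hget
      have hnocc : ¬ [c0] <:+: List.drop S id.toList :=
        (PySem.Chars.findFrom_natCast_eq_neg_one_iff id.toList [c0] S hSn).mp hf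
      apply hnocc
      have hSi : S ≤ i := by exact_mod_cast (clamp_le_iff id li i hwin.2.2).mpr hwin.1
      have hpre : [c0] <+: List.drop (i - S) (List.drop S id.toList) := by
        rw [List.drop_drop, Nat.add_sub_cancel' hSi]
        exact (single_prefix_drop id.toList c0 i).mpr hget
      exact ((PySem.Chars.isIn_iff_infix _ _).mp ((PySem.Chars.exists_prefix_drop_iff_isIn _ _).mp ⟨i - S, hpre⟩))
    · rw [if_neg hf]
      obtain ⟨hge, hpre, hmin⟩ := PySem.Chars.findFrom_natCast_spec id.toList [c0] S hSn hf
      set f : Int := PySem.Chars.findFrom id.toList [c0] (S : Int) none with hfdef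
      have hf0 : ((f.toNat : Nat) : Int) = f := Int.toNat_of_nonneg (le_trans (by positivity) hge)
      have hgetf : id.toList[f.toNat]? = some c0 := (single_prefix_drop id.toList c0 f.toNat).mp hpre
      have hf0n : f.toNat < id.toList.length := by
        rcases List.getElem?_eq_some_iff.mp hgetf with ⟨h, _⟩
        exact h
      have hlen : PySem.Str.len id = (id.toList.length : Int) := rfl
      by_cases hb : PySem.Str.len id - rd ≤ f
      · rw [if_pos hb]
        rw [hlen] at hb
        apply QA_succ_no id rd li k hk10 _ ihk
        intro i hwin hget
        have hSi : S ≤ i := by exact_mod_cast (clamp_le_iff id li i hwin.2.2).mpr hwin.1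
        have hif : i < f.toNat := by
          have h1 : (i : Int) < (id.toList.length : Int) - rd := hwin.2.1
          omega
        exact absurd ((single_prefix_drop id.toList c0 i).mpr hget) (hmin i hSi hif)
      · rw [if_neg hb]
        rw [hlen] at hb
        have hpg : PySem.Str.pyGet? id f = some c0 := by
          rw [← hf0, PySem.Str.pyGet?_natCast]
          exact hgetf
        rw [hpg]
        right
        have hwf : InWin id rd li f.toNat := by
          refine ⟨(clamp_le_iff id li f.toNat hf0n).mp (by omega), by omega, hf0n⟩
        refine ⟨c0, f.toNat, by rw [hf0], hwf, hgetf, dig_digChar k hk10, by rw [hc0, digChar_toNat k hk10]; omega, ?_, ?_⟩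
        · intro j c' _ _ _ hltj
          rw [char_le_iff, hc0, digChar_toNat k hk10]
          omega
        · intro j hwj hjf
          have hSj : S ≤ j := by exact_mod_cast (clamp_le_iff id li j hwj.2.2).mpr hwj.1
          intro hgj
          exact absurd ((single_prefix_drop id.toList c0 j).mpr hgj) (hmin j hSj hjf)

lemma A_Q (id : String) (rd li : Int) : Q id rd li (find_next_number id rd li) := by
  have h := A_loop_QA id rd li 10 (le_refl 10)
  rcases h with ⟨e, hn⟩ | ⟨c, i, e, hw, hg, hd, _, hm, hf⟩
  · left
    refine ⟨e, ?_⟩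
    intro i c hwin hget hdig
    have h1 : 48 ≤ c.toNat := (char_le_iff '0' c).mp hdig.1
    have h2 : c.toNat ≤ 57 := (char_le_iff c '9').mp hdig.2
    exact hn i c hwin hget hdig (by omega)
  · right
    refine ⟨c, i, e, hw, hg, hd, ?_, hf⟩
    intro j c' hwj hgj hdj
    have h2 : c'.toNat ≤ 57 := (char_le_iff c' '9').mp hdj.2
    exact hm j c' hwj hgj hdj (by omega)

-- B's fold invariant: after scanning positions in [pvStart, a), the accumulator is
-- none (no digit seen) or the greatest digit seen with its first index
def GoodAcc (id : String) (rd li : Int) (a : Int) (acc : Option (Char × Int)) : Prop :=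
  (acc = none ∧ ∀ (j : Nat) c, pvStart id li ≤ (j : Int) → (j : Int) < a → id.toList[j]? = some c → ¬ ('0' ≤ c ∧ c ≤ '9'))
  ∨ (∃ (c : Char) (i : Nat), acc = some (c, (i : Int)) ∧ pvStart id li ≤ (i : Int) ∧ (i : Int) < a ∧
      id.toList[i]? = some c ∧ ('0' ≤ c ∧ c ≤ '9') ∧
      (∀ (j : Nat) c', pvStart id li ≤ (j : Int) → (j : Int) < a → id.toList[j]? = some c' → ('0' ≤ c' ∧ c' ≤ '9') → c' ≤ c) ∧
      (∀ (j : Nat), pvStart id li ≤ (j : Int) → j < i → id.toList[j]? ≠ some c))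

lemma pvStart_nonneg (id : String) (li : Int) : 0 ≤ pvStart id li := by
  unfold pvStart; split_ifs <;> omega

-- the loop body of B, named so the fold lemma and its uses share one term
def bStep (id : String) : Option (Char × Int) → Int → Option (Char × Int) := fun best i =>
  match PySem.Str.pyGet? id i with
  | some c =>
    if ('0' ≤ c && c ≤ '9') && (match best with | none => true | some bd => decide (bd.1 < c)) then
      some (c, i)
    else best
  | none => best

lemma B_fold (id : String) (rd li : Int) (m : Nat) : ∀ (a : Int), pvStart id li ≤ a →
    a + m ≤ (id.toList.length : Int) → ∀ acc, GoodAcc id rd li a acc →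
    GoodAcc id rd li (a + m)
      ((PySem.List.pyRange a (a + m) 1).foldl (bStep id) acc) := by
  induction m with
  | zero =>
    intro a _ _ acc hacc
    have hr : PySem.List.pyRange a (a + ((0:Nat):Int)) 1 = [] := by
      rw [PySem.List.pyRange_one]; simp
    rw [hr]
    simpa using hacc
  | succ m ih =>
    intro a ha hbound acc hacc
    have ha0 : 0 ≤ a := le_trans (pvStart_nonneg id li) ha
    have hj0 : ((a.toNat : Nat) : Int) = a := Int.toNat_of_nonneg ha0
    have hj0n : a.toNat < id.toList.length := by push_cast at hbound; omega
    rw [PySem.List.pyRange_one_cons (by push_cast; omega), List.foldl_cons,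
        show a + ((m+1 : Nat) : Int) = (a + 1) + (m : Nat) by push_cast; omega]
    apply ih (a + 1) (by omega) (by push_cast at hbound ⊢; omega)
    show GoodAcc id rd li (a + 1) (bStep id acc a)
    unfold bStep
    have hgets : id.toList[a.toNat]? = some (id.toList[a.toNat]'hj0n) := List.getElem?_eq_getElem hj0n
    have hget : PySem.Str.pyGet? id a = some (id.toList[a.toNat]'hj0n) := by
      have h1 : PySem.Str.pyGet? id a = id.toList[a.toNat]? := by
        conv_lhs => rw [← hj0]
        exact PySem.Str.pyGet?_natCast ..
      rw [h1, hgets]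
    simp only [hget]
    rcases hacc with ⟨hnone, hn⟩ | ⟨cb, ib, heq, hb1, hb2, hb3, hb4, hb5, hb6⟩
    · subst hnone
      by_cases hd : ('0' ≤ id.toList[a.toNat]'hj0n ∧ id.toList[a.toNat]'hj0n ≤ '9')
      · rw [if_pos (by simp [hd.1, hd.2])]
        right
        refine ⟨id.toList[a.toNat]'hj0n, a.toNat, by rw [hj0], by omega, by omega, hgets, hd, ?_, ?_⟩
        · intro j c' hj1 hj2 hj3 _
          by_cases hja : (j : Int) < a
          · exact absurd hj3 (fun h => (hn j c' hj1 hja h) ‹_›)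
          · have : j = a.toNat := by omega
            subst this
            rw [hgets] at hj3
            exact le_of_eq (Option.some.inj hj3).symm
        · intro j hj1 hj2 hj3
          have hja : (j : Int) < a := by omega
          exact hn j _ hj1 hja hj3 hd
      · rw [if_neg (by simpa using fun h1 h2 => hd ⟨h1, h2⟩)]
        left
        refine ⟨rfl, ?_⟩
        intro j c hj1 hj2 hj3
        by_cases hja : (j : Int) < a
        · exact hn j c hj1 hja hj3
        · have : j = a.toNat := by omega
          subst this
          rw [hgets] at hj3
          rw [← Option.some.inj hj3]
          exact hd
    · subst heq
      by_cases hd : ('0' ≤ id.toList[a.toNat]'hj0n ∧ id.toList[a.toNat]'hj0n ≤ '9')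
      · by_cases hlt : cb < id.toList[a.toNat]'hj0n
        · rw [if_pos (by simp [hd.1, hd.2, hlt])]
          right
          refine ⟨id.toList[a.toNat]'hj0n, a.toNat, by rw [hj0], by omega, by omega, hgets, hd, ?_, ?_⟩
          · intro j c' hj1 hj2 hj3 hj4
            by_cases hja : (j : Int) < a
            · exact le_trans (hb5 j c' hj1 hja hj3 hj4) (le_of_lt hlt)
            · have : j = a.toNat := by omega
              subst this
              rw [hgets] at hj3
              exact le_of_eq (Option.some.inj hj3).symm
          · intro j hj1 hj2 hj3
            have hja : (j : Int) < a := by omega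
            have := hb5 j _ hj1 hja hj3 hd
            exact absurd hlt (not_lt_of_ge this)
        · rw [if_neg (by simp [hlt])]
          right
          refine ⟨cb, ib, rfl, hb1, by omega, hb3, hb4, ?_, hb6⟩
          intro j c' hj1 hj2 hj3 hj4
          by_cases hja : (j : Int) < a
          · exact hb5 j c' hj1 hja hj3 hj4
          · have : j = a.toNat := by omega
            subst this
            rw [hgets] at hj3
            rw [← Option.some.inj hj3]
            exact le_of_not_gt hlt
      · rw [if_neg (by simpa using fun h1 h2 => absurd ⟨h1, h2⟩ hd)]
        right
        refine ⟨cb, ib, rfl, hb1, by omega, hb3, hb4, ?_, hb6⟩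
        intro j c' hj1 hj2 hj3 hj4
        by_cases hja : (j : Int) < a
        · exact hb5 j c' hj1 hja hj3 hj4
        · have : j = a.toNat := by omega
          subst this
          rw [hgets] at hj3
          rw [← Option.some.inj hj3] at hj4
          exact absurd hj4 hd

lemma B_Q (id : String) (rd li : Int) : Q id rd li (find_next_number_alt id rd li) := by
  show Q id rd li
    (match (PySem.List.pyRange (pvStart id li)
        (min ((id.toList.length : Int)) ((id.toList.length : Int) - rd)) 1).foldl (bStep id) none with
      | some (c, i) => (String.singleton c, i)
      | none => ("a", -1))
  by_cases hc : pvStart id li ≤ min ((id.toList.length : Int)) ((id.toList.length : Int) - rd)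
  · set b := min ((id.toList.length : Int)) ((id.toList.length : Int) - rd) with hb
    set m := (b - pvStart id li).toNat with hm
    have hm' : pvStart id li + (m : Int) = b := by
      rw [hm]
      omega
    have hstart : GoodAcc id rd li (pvStart id li) none := by
      left
      exact ⟨rfl, fun j c h1 h2 _ => absurd (lt_of_le_of_lt h1 h2) (lt_irrefl _)⟩
    have hg := B_fold id rd li m (pvStart id li) le_rfl
      (by have := min_le_left ((id.toList.length : Int)) ((id.toList.length : Int) - rd); omega)
      none hstart
    rw [hm'] at hg
    rcases hg with ⟨hne, hn⟩ | ⟨c, i, heq, h1, h2, h3, h4, h5, h6⟩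
    · simp only [hne]
      left
      refine ⟨rfl, ?_⟩
      intro i c hwin hget
      exact hn i c hwin.1 (by rw [hb]; rcases hwin with ⟨_, w2, w3⟩; omega) hget
    · simp only [heq]
      right
      have hib : (i : Int) < b := h2
      refine ⟨c, i, rfl, ⟨h1, by rw [hb] at hib; omega, by rw [hb] at hib; omega⟩, h3, h4, ?_, ?_⟩
      · intro j c' hwj hgj hdj
        exact h5 j c' hwj.1 (by rw [hb]; rcases hwj with ⟨_, w2, w3⟩; omega) hgj hdj
      · intro j hwj hji
        exact h6 j hwj.1 hji
  · have hr : PySem.List.pyRange (pvStart id li)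
        (min ((id.toList.length : Int)) ((id.toList.length : Int) - rd)) 1 = [] := by
      rw [PySem.List.pyRange_one]
      have : (min ((id.toList.length : Int)) ((id.toList.length : Int) - rd) - pvStart id li).toNat = 0 := by
        omega
      rw [this]
      simp
    rw [hr]
    left
    refine ⟨rfl, ?_⟩
    intro i c hwin _
    rcases hwin with ⟨w1, w2, w3⟩
    refine absurd ?_ hc
    have w3' : (i : Int) < (id.toList.length : Int) := by exact_mod_cast w3
    omega

-- ===== VERDICT (by name: the statement is the Claim_ definition above) =====
theorem find_next_number_spec : Claim_equal_find_next_number := by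
  intro id rd li _
  exact Q_unique id rd li _ _ (A_Q id rd li) (B_Q id rd li)
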